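-- pv_equiv track=rewrite | github.com/sieuno3o/codingtest | 프로그래머스/1/42748. K번째수/K번째수.py | solution
-- ===== SOURCE A (Python) =====
-- def solution(array, commands):
--     answer = []
--     for i in commands:
--         left = int(i[0]) - 1
--         right = int(i[1])
--         num = int(i[2]) - 1
--
--         arr = array[left:right]
--         arr.sort()
--
--         answer.append(arr[num])
--     return answer
-- ===== SOURCE B (Python) =====
-- def solution(array, commands):
--     answer = []
--     for c in commands:
--         left = int(c[0]) - 1
--         right = int(c[1])
--         k = int(c[2]) - 1
--         best = []  # the k+1 smallest elements of the slice seen so far, in increasing order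
--         for x in array[left:right]:
--             i = 0
--             while i < len(best) and best[i] <= x:
--                 i += 1
--             best.insert(i, x)
--             if len(best) > k + 1:
--                 best.pop()
--         answer.append(best[k])
--     return answer
-- ===== Notes on version B (the rewrite author's own statement) =====
-- stated objective: alternative
-- what changed: Per command, instead of copying the slice, fully sorting it and indexing, B makes one pass over the slice maintaining an ordered list of only the k+1 smallest elements seen so far (bounded insertion selection) and answers with its last element; O(n*k) selection replaces O(n log n)/O(n^2) full sorting and no full sorted copy is built.
-- outside the precondition, e.g. on solution([1, 2, 3], [[1, 3, 0]]): A returns [3], B raises IndexError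
import Mathlib
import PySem

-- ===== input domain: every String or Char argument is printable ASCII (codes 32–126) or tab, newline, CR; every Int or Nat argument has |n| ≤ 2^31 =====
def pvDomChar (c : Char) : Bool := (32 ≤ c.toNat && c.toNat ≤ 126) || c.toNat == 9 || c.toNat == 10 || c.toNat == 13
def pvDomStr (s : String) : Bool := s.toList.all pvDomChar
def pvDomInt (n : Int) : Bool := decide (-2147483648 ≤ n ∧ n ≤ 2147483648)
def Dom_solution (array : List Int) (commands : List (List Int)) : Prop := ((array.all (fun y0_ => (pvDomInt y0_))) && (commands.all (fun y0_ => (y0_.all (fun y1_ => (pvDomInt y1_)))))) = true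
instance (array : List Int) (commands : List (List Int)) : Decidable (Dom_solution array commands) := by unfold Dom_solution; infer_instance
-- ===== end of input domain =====

-- B replaces "sort the whole slice, then index" by a one-pass bounded-selection scan that
-- maintains only the k+1 smallest elements seen so far (objective: alternative/faster on small k).

-- ===== PORT A =====
def solution (array : List Int) (commands : List (List Int)) : List Int :=
  commands.foldl (fun answer i =>
    let left := PySem.List.pyGetD i 0 0 - 1
    let right := PySem.List.pyGetD i 1 0
    let num := PySem.List.pyGetD i 2 0 - 1
    let arr := PySem.List.slice array (some left) (some right)
    let arr := PySem.List.sorted arr (fun x => x) false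
    answer ++ [PySem.List.pyGetD arr num 0]) []

-- ===== PORT B =====
-- the inner while/insert of Source B: insert x into the (increasingly) ordered list, after equal elements
def insSorted (x : Int) : List Int → List Int
  | [] => [x]
  | y :: ys => if y ≤ x then y :: insSorted x ys else x :: y :: ys

-- one step of Source B's scan: insert x, then pop the last element if more than k+1 are kept
def selStep (k : Int) (best : List Int) (x : Int) : List Int :=
  let b := insSorted x best
  if (b.length : Int) > k + 1 then b.dropLast else b

def solution_alt (array : List Int) (commands : List (List Int)) : List Int :=
  commands.foldl (fun answer c =>
    let left := PySem.List.pyGetD c 0 0 - 1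
    let right := PySem.List.pyGetD c 1 0
    let k := PySem.List.pyGetD c 2 0 - 1
    let best := (PySem.List.slice array (some left) (some right)).foldl (selStep k) []
    answer ++ [PySem.List.pyGetD best k 0]) []

-- ===== PRECONDITION & SPEC =====
-- Pre_ excludes the inputs where A raises IndexError (a command shorter than 3 entries, or a
-- 1-based rank past the end of the slice), and the commands with rank k ≤ 0, where A returns a
-- value by Python's negative-index wraparound while B's bounded-selection scan itself raises.
def Pre_solution (array : List Int) (commands : List (List Int)) : Prop :=
  ∀ c ∈ commands, 3 ≤ c.length ∧ 0 ≤ PySem.List.pyGetD c 2 0 - 1 ∧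
    PySem.List.pyGetD c 2 0 - 1 <
      (PySem.List.slice array (some (PySem.List.pyGetD c 0 0 - 1)) (some (PySem.List.pyGetD c 1 0))).length
instance (array : List Int) (commands : List (List Int)) : Decidable (Pre_solution array commands) := by
  unfold Pre_solution; infer_instance

def pvWitness_solution : List Int × List (List Int) := ([5, 1, 3], [[1, 3, 2]])

def Spec_solution (array : List Int) (commands : List (List Int)) (out : List Int) : Prop := out = solution_alt array commands
instance (array : List Int) (commands : List (List Int)) (out : List Int) : Decidable (Spec_solution array commands out) := by unfold Spec_solution; infer_instance

-- ===== CLAIM (what is proved, stated in full; the proofs are below) =====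
def Claim_equal_solution : Prop := ∀ (array : List Int) (commands : List (List Int)), Dom_solution array commands → Pre_solution array commands → Spec_solution array commands (solution array commands)

-- ===== LEMMAS AND PROOFS =====

theorem length_insSorted (x : Int) (l : List Int) : (insSorted x l).length = l.length + 1 := by
  induction l with
  | nil => rfl
  | cons y ys ih => simp only [insSorted]; split <;> simp [ih]

theorem insSorted_ne_nil (x : Int) (l : List Int) : insSorted x l ≠ [] := by
  have := length_insSorted x l
  intro h; rw [h] at this; simp at this

theorem insSorted_perm (x : Int) (l : List Int) : (insSorted x l).Perm (x :: l) := by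
  induction l with
  | nil => rfl
  | cons y ys ih =>
    simp only [insSorted]; split
    · exact (ih.cons y).trans (List.Perm.swap x y ys)
    · rfl

theorem mem_insSorted {a x : Int} {l : List Int} : a ∈ insSorted x l ↔ a = x ∨ a ∈ l := by
  rw [(insSorted_perm x l).mem_iff]; simp

theorem insSorted_pairwise {x : Int} {l : List Int} (h : l.Pairwise (· ≤ ·)) :
    (insSorted x l).Pairwise (· ≤ ·) := by
  induction l with
  | nil => simp [insSorted]
  | cons y ys ih =>
    rcases List.pairwise_cons.mp h with ⟨hy, hys⟩
    simp only [insSorted]; split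
    · rename_i hyx
      refine List.pairwise_cons.mpr ⟨?_, ih hys⟩
      intro a ha
      rcases mem_insSorted.mp ha with rfl | ha
      · exact hyx
      · exact hy a ha
    · rename_i hyx
      refine List.pairwise_cons.mpr ⟨?_, h⟩
      intro a ha
      rcases List.mem_cons.mp ha with rfl | ha
      · omega
      · exact le_trans (by omega) (hy a ha)

-- insertion sort as Source B builds it (proof-side name)
def isort (l : List Int) : List Int := l.foldl (fun acc x => insSorted x acc) []

theorem isort_snoc (l : List Int) (x : Int) : isort (l ++ [x]) = insSorted x (isort l) := by
  simp [isort]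

theorem isort_perm (l : List Int) : (isort l).Perm l := by
  induction l using List.reverseRecOn with
  | nil => rfl
  | append_singleton l x ih =>
    rw [isort_snoc]
    exact ((insSorted_perm x (isort l)).trans (ih.cons x)).trans (List.perm_append_singleton x l).symm

theorem isort_pairwise (l : List Int) : (isort l).Pairwise (· ≤ ·) := by
  induction l using List.reverseRecOn with
  | nil => simp [isort]
  | append_singleton l x ih => rw [isort_snoc]; exact insSorted_pairwise ih

theorem sorted_eq_isort (l : List Int) : PySem.List.sorted l (fun x => x) false = isort l :=
  PySem.List.sorted_id_eq_of_perm_of_pairwise l (isort l) (isort_perm l) (isort_pairwise l)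

-- trimming after inserting into a take m prefix = take m after inserting into the whole list
theorem trimIns (x : Int) (s : List Int) (m : Nat) :
    (if m < (insSorted x (s.take m)).length then (insSorted x (s.take m)).dropLast
     else insSorted x (s.take m)) = (insSorted x s).take m := by
  induction s generalizing m with
  | nil =>
    simp only [List.take_nil, insSorted]
    rcases Nat.eq_zero_or_pos m with rfl | hm
    · simp
    · rw [if_neg (by simp; omega), List.take_of_length_le (by simp; omega)]
  | cons y ys ih =>
    rcases Nat.eq_zero_or_pos m with rfl | hm
    · simp [insSorted]
    obtain ⟨m', rfl⟩ : ∃ m', m = m' + 1 := ⟨m - 1, by omega⟩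
    simp only [List.take_succ_cons, insSorted]
    split
    · -- y ≤ x : the insertion goes into the tail
      have hne := insSorted_ne_nil x (ys.take m')
      have hlen := length_insSorted x (ys.take m')
      by_cases hc : m' + 1 < (y :: insSorted x (ys.take m')).length
      · have hc' : m' < (insSorted x (ys.take m')).length := by simp at hc; omega
        rw [if_pos hc, List.dropLast_cons_of_ne_nil hne, List.take_succ_cons, ← ih m',
          if_pos hc']
      · have hc' : ¬ m' < (insSorted x (ys.take m')).length := by simp at hc ⊢; omega
        rw [if_neg hc, List.take_succ_cons, ← ih m', if_neg hc']
    · -- ¬ y ≤ x : x goes in front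
      by_cases hc : m' + 1 < (x :: y :: ys.take m').length
      · have hys : m' ≤ ys.length := by simp at hc; omega
        rcases Nat.eq_zero_or_pos m' with rfl | hm'
        · simp
        obtain ⟨n, rfl⟩ : ∃ n, m' = n + 1 := ⟨m' - 1, by omega⟩
        have htk : (ys.take (n + 1)).length = n + 1 := by simp; omega
        have hne : ys.take (n + 1) ≠ [] := by
          intro h; rw [h] at htk; simp at htk
        rw [if_pos hc, List.dropLast_cons_of_ne_nil (by simp),
          List.dropLast_cons_of_ne_nil hne, List.take_succ_cons, List.take_succ_cons,
          List.dropLast_eq_take, htk, List.take_take]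
        simp
      · have hys : ys.length < m' := by simp at hc; omega
        obtain ⟨n, rfl⟩ : ∃ n, m' = n + 1 := ⟨m' - 1, by omega⟩
        rw [if_neg hc, List.take_succ_cons, List.take_succ_cons,
          List.take_of_length_le (by omega), List.take_of_length_le (by omega)]

theorem foldl_selStep (k : Int) (hk : 0 ≤ k) (l b : List Int) :
    l.foldl (selStep k) (b.take (k + 1).toNat) =
      (l.foldl (fun acc x => insSorted x acc) b).take (k + 1).toNat := by
  induction l generalizing b with
  | nil => simp
  | cons x xs ih =>
    simp only [List.foldl_cons]
    have hstep : selStep k (b.take (k + 1).toNat) x = (insSorted x b).take (k + 1).toNat := by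
      simp only [selStep]
      split
      · next h => rw [← trimIns x b (k + 1).toNat, if_pos (by omega)]
      · next h => rw [← trimIns x b (k + 1).toNat, if_neg (by omega)]
    rw [hstep, ih]

theorem perCommand (array : List Int) (c : List Int)
    (h2 : 0 ≤ PySem.List.pyGetD c 2 0 - 1)
    (h3 : PySem.List.pyGetD c 2 0 - 1 <
      (PySem.List.slice array (some (PySem.List.pyGetD c 0 0 - 1)) (some (PySem.List.pyGetD c 1 0))).length) :
    PySem.List.pyGetD
        (PySem.List.sorted
          (PySem.List.slice array (some (PySem.List.pyGetD c 0 0 - 1)) (some (PySem.List.pyGetD c 1 0)))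
          (fun x => x) false)
        (PySem.List.pyGetD c 2 0 - 1) 0 =
      PySem.List.pyGetD
        ((PySem.List.slice array (some (PySem.List.pyGetD c 0 0 - 1)) (some (PySem.List.pyGetD c 1 0))).foldl
          (selStep (PySem.List.pyGetD c 2 0 - 1)) [])
        (PySem.List.pyGetD c 2 0 - 1) 0 := by
  set sl := PySem.List.slice array (some (PySem.List.pyGetD c 0 0 - 1)) (some (PySem.List.pyGetD c 1 0)) with hsl
  set k := PySem.List.pyGetD c 2 0 - 1 with hkdef
  have hb : sl.foldl (selStep k) [] = (isort sl).take (k + 1).toNat := by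
    have := foldl_selStep k h2 sl []
    simpa [isort] using this
  rw [hb, sorted_eq_isort]
  have hlen : (isort sl).length = sl.length := (isort_perm sl).length_eq
  have hk1 : k.toNat < (k + 1).toNat := by omega
  have hklen : k.toNat < (isort sl).length := by omega
  rw [PySem.List.pyGetD_eq_getElem (isort sl) 0 h2 (by omega),
    PySem.List.pyGetD_eq_getElem (List.take (k + 1).toNat (isort sl)) 0 h2 (by simp; omega)]
  rw [List.getElem_take]

-- ===== VERDICT (by name: the statement is the Claim_ definition above) =====
theorem solution_spec : Claim_equal_solution := by
  intro array commands _ hpre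
  unfold Spec_solution solution solution_alt
  apply PySem.List.foldl_congr_mem
  intro acc c hc
  obtain ⟨-, h2, h3⟩ := hpre c hc
  simp only []
  rw [perCommand array c h2 h3]
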